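-- pv_equiv track=rewrite | github.com/1B05H1N/soc-sop-generator | src/confluence_formatter.py | _format_table_content
-- ===== SOURCE A (Python) =====
-- from typing import Dict, Any, List
--
-- def _format_table_content(table_lines: List[str]) -> str:
--     """Format table content for Confluence"""
--     if not table_lines:
--         return ""
--
--     # Parse table headers and rows
--     headers = []
--     rows = []
--
--     for i, line in enumerate(table_lines):
--         cells = [cell.strip() for cell in line.split('|')[1:-1]]  # Remove empty cells at start/end
--         if i == 0:
--             headers = cells
--         elif i == 1 and all(cell.replace('-', '').replace('|', '').strip() == '' for cell in cells):
--             # Skip separator line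
--             continue
--         else:
--             rows.append(cells)
--
--     # Create Confluence table
--     table_html = '<table><tbody>'
--
--     # Add header row
--     if headers:
--         table_html += '<tr>'
--         for header in headers:
--             table_html += f'<th><strong>{header}</strong></th>'
--         table_html += '</tr>'
--
--     # Add data rows
--     for row in rows:
--         table_html += '<tr>'
--         for cell in row:
--             table_html += f'<td>{cell}</td>'
--         table_html += '</tr>'
--
--     table_html += '</tbody></table>'
--     return table_html
-- ===== SOURCE B (Python) =====
-- def _format_table_content(table_lines):
--     """Format table content for Confluence (single pass, join-based)."""
--     if not table_lines:
--         return ""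
--     parts = ['<table><tbody>']
--     for i, line in enumerate(table_lines):
--         cells = [c.strip() for c in line.split('|')[1:-1]]
--         if i == 0:
--             if cells:
--                 parts.append('<tr>' + ''.join('<th><strong>%s</strong></th>' % c for c in cells) + '</tr>')
--         elif i == 1 and all(c.replace('-', '').replace('|', '').strip() == '' for c in cells):
--             pass
--         else:
--             parts.append('<tr>' + ''.join('<td>%s</td>' % c for c in cells) + '</tr>')
--     parts.append('</tbody></table>')
--     return ''.join(parts)
-- ===== Notes on version B (the rewrite author's own statement) =====
-- stated objective: alternative
-- what changed: Collapses A's two phases (collect headers/rows into lists, then render them in separate loops with string +=) into a single pass over enumerate(table_lines) that emits each row's HTML fragment immediately into a parts list joined once at the end.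
import Mathlib
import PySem

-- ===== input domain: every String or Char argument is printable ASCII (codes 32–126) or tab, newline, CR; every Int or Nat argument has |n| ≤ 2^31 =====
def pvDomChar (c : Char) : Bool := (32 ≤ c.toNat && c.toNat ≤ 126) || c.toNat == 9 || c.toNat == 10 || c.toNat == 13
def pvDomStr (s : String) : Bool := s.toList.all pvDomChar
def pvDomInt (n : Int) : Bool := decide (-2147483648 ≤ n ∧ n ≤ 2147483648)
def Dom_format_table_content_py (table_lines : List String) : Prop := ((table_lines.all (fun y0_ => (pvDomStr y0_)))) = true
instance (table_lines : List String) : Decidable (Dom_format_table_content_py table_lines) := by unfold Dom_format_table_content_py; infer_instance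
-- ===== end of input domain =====

-- B collapses A's two phases (collect headers/rows, then render) into one pass that emits
-- each row's HTML fragment directly and joins them; same output, alternative decomposition.

-- ===== PORT A =====
-- cells = [cell.strip() for cell in line.split('|')[1:-1]]
def pvStripCellsA (line : String) : List String :=
  (PySem.List.slice ((PySem.Str.split? line "|").getD []) (some 1) (some (-1))).map
    (fun cell => PySem.Str.strip cell)

-- cell.replace('-', '').replace('|', '').strip() == ''
def pvSepCellA (cell : String) : Bool :=
  PySem.Str.strip (PySem.Str.replace (PySem.Str.replace cell "-" "") "|" "") == ""

-- one iteration of A's parsing loop; state = (headers, rows)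
def pvParseStepA (st : List String × List (List String)) (p : Int × String) :
    List String × List (List String) :=
  let cells := pvStripCellsA p.2
  if p.1 == 0 then (cells, st.2)
  else if p.1 == 1 && cells.all pvSepCellA then st
  else (st.1, st.2 ++ [cells])

def format_table_content_py (table_lines : List String) : String :=
  if table_lines = [] then ""
  else
    let st := (PySem.List.enumerate table_lines 0).foldl pvParseStepA ([], [])
    let headers := st.1
    let rows := st.2
    let t0 := "<table><tbody>"
    let t1 :=
      if headers ≠ [] then
        (headers.foldl (fun acc h => acc ++ "<th><strong>" ++ h ++ "</strong></th>")
          (t0 ++ "<tr>")) ++ "</tr>"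
      else t0
    let t2 := rows.foldl
      (fun acc row =>
        (row.foldl (fun a c => a ++ "<td>" ++ c ++ "</td>") (acc ++ "<tr>")) ++ "</tr>") t1
    t2 ++ "</tbody></table>"

-- ===== PORT B =====
def pvStripCellsB (line : String) : List String :=
  (PySem.List.slice ((PySem.Str.split? line "|").getD []) (some 1) (some (-1))).map
    PySem.Str.strip

def pvSepCellB (cell : String) : Bool :=
  PySem.Str.strip (PySem.Str.replace (PySem.Str.replace cell "-" "") "|" "") == ""

def pvThB (c : String) : String := "<th><strong>" ++ c ++ "</strong></th>"
def pvTdB (c : String) : String := "<td>" ++ c ++ "</td>"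

-- one iteration of B's single emitting pass; state = parts (list of fragments)
def pvEmitStepB (parts : List String) (p : Int × String) : List String :=
  let cells := pvStripCellsB p.2
  if p.1 == 0 then
    if cells ≠ [] then
      parts ++ ["<tr>" ++ PySem.Str.join "" (cells.map pvThB) ++ "</tr>"]
    else parts
  else if p.1 == 1 && cells.all pvSepCellB then parts
  else parts ++ ["<tr>" ++ PySem.Str.join "" (cells.map pvTdB) ++ "</tr>"]

def format_table_content_py_alt (table_lines : List String) : String :=
  if table_lines = [] then ""
  else
    let parts := (PySem.List.enumerate table_lines 0).foldl pvEmitStepB ["<table><tbody>"]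
    PySem.Str.join "" (parts ++ ["</tbody></table>"])

-- ===== PRECONDITION & SPEC =====
def Spec_format_table_content_py (table_lines : List String) (out : String) : Prop := out = format_table_content_py_alt table_lines
instance (table_lines : List String) (out : String) : Decidable (Spec_format_table_content_py table_lines out) := by unfold Spec_format_table_content_py; infer_instance

-- ===== CLAIM (what is proved, stated in full; the proofs are below) =====
def Claim_equal_format_table_content_py : Prop := ∀ (table_lines : List String), Dom_format_table_content_py table_lines → Spec_format_table_content_py table_lines (format_table_content_py table_lines)

-- ===== LEMMAS AND PROOFS =====

theorem pv_join_nil : PySem.Str.join "" [] = "" := by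
  simp [PySem.Str.join, PySem.Chars.join, List.intercalate]

theorem pv_join_cons (p : String) (ps : List String) :
    PySem.Str.join "" (p :: ps) = p ++ PySem.Str.join "" ps := by
  have h : ∀ (ls : List (List Char)), ([] : List Char).intercalate ls = ls.flatten := by
    intro ls; induction ls with
    | nil => simp [List.intercalate]
    | cons a as ih => cases as <;> simp_all [List.intercalate, List.intersperse]
  simp [PySem.Str.join, PySem.Chars.join, h]

theorem pv_join_append (xs ys : List String) :
    PySem.Str.join "" (xs ++ ys) = PySem.Str.join "" xs ++ PySem.Str.join "" ys := by
  induction xs with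
  | nil => simp [pv_join_nil]
  | cons x xs ih => simp [pv_join_cons, ih, String.append_assoc]

-- A's header-rendering fold as a join
theorem pv_fold_th (l : List String) (init : String) :
    l.foldl (fun acc h => acc ++ ("<th><strong>" ++ (h ++ "</strong></th>"))) init
      = init ++ PySem.Str.join "" (l.map pvThB) := by
  induction l generalizing init with
  | nil => simp [pv_join_nil]
  | cons x xs ih => rw [List.foldl_cons, ih]; simp [pv_join_cons, pvThB, String.append_assoc]

-- A's cell-rendering fold as a join
theorem pv_fold_td (l : List String) (init : String) :
    l.foldl (fun a c => a ++ ("<td>" ++ (c ++ "</td>"))) init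
      = init ++ PySem.Str.join "" (l.map pvTdB) := by
  induction l generalizing init with
  | nil => simp [pv_join_nil]
  | cons x xs ih => rw [List.foldl_cons, ih]; simp [pv_join_cons, pvTdB, String.append_assoc]

def pvRowFrag (row : List String) : String :=
  "<tr>" ++ PySem.Str.join "" (row.map pvTdB) ++ "</tr>"

-- A's row-rendering fold as a join of row fragments
theorem pv_fold_rows (rows : List (List String)) (init : String) :
    rows.foldl (fun acc row =>
        (row.foldl (fun a c => a ++ ("<td>" ++ (c ++ "</td>"))) (acc ++ "<tr>")) ++ "</tr>") init
      = init ++ PySem.Str.join "" (rows.map pvRowFrag) := by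
  induction rows generalizing init with
  | nil => simp [pv_join_nil]
  | cons r rs ih =>
    rw [List.foldl_cons, ih, pv_fold_td]
    simp [pv_join_cons, pvRowFrag, String.append_assoc]

-- the data rows both loops keep, for indices ≥ 1
def pvDataRows : List String → Int → List (List String)
  | [], _ => []
  | l :: ls, i =>
    if i == 1 && (pvStripCellsA l).all pvSepCellA then pvDataRows ls (i + 1)
    else pvStripCellsA l :: pvDataRows ls (i + 1)

theorem pv_foldA (ls : List String) (i : Int) (hi : 1 ≤ i)
    (h : List String) (rs : List (List String)) :
    (PySem.List.enumerate ls i).foldl pvParseStepA (h, rs) = (h, rs ++ pvDataRows ls i) := by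
  induction ls generalizing i rs with
  | nil => simp [PySem.List.enumerate_nil, pvDataRows]
  | cons l tl ih =>
    rw [PySem.List.enumerate_cons, List.foldl_cons]
    have h0 : (i == 0) = false := by simp; omega
    by_cases hsep : (i == 1 && (pvStripCellsA l).all pvSepCellA) = true
    · simp [pvParseStepA, h0, hsep, pvDataRows, ih (i + 1) (by omega)]
    · simp only [Bool.not_eq_true] at hsep
      simp [pvParseStepA, h0, hsep, pvDataRows, ih (i + 1) (by omega)]

theorem pv_foldB (ls : List String) (i : Int) (hi : 1 ≤ i) (parts : List String) :
    (PySem.List.enumerate ls i).foldl pvEmitStepB parts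
      = parts ++ (pvDataRows ls i).map pvRowFrag := by
  induction ls generalizing i parts with
  | nil => simp [PySem.List.enumerate_nil, pvDataRows]
  | cons l tl ih =>
    rw [PySem.List.enumerate_cons, List.foldl_cons]
    have h0 : (i == 0) = false := by simp; omega
    have hAB : pvStripCellsB l = pvStripCellsA l := rfl
    have hAB2 : pvSepCellB = pvSepCellA := rfl
    by_cases hsep : (i == 1 && (pvStripCellsA l).all pvSepCellA) = true
    · simp [pvEmitStepB, h0, hAB, hAB2, hsep, pvDataRows, ih (i + 1) (by omega)]
    · simp only [Bool.not_eq_true] at hsep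
      simp [pvEmitStepB, h0, hAB, hAB2, hsep, pvDataRows, ih (i + 1) (by omega), pvRowFrag,
        String.append_assoc]

-- ===== VERDICT (by name: the statement is the Claim_ definition above) =====
theorem format_table_content_py_spec : Claim_equal_format_table_content_py := by
  intro table_lines _
  unfold Spec_format_table_content_py
  cases table_lines with
  | nil => rfl
  | cons l0 rest =>
    unfold format_table_content_py format_table_content_py_alt
    simp only [reduceCtorEq, if_false, PySem.List.enumerate_cons, List.foldl_cons]
    have hstep : pvParseStepA ([], []) ((0 : Int), l0) = (pvStripCellsA l0, []) := by
      simp [pvParseStepA]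
    have hAB : pvStripCellsB l0 = pvStripCellsA l0 := rfl
    rw [hstep, pv_foldA rest (0 + 1) (by omega), pv_foldB rest (0 + 1) (by omega)]
    by_cases hc : pvStripCellsA l0 = []
    · simp [pvEmitStepB, hAB, hc, pv_fold_rows, pv_join_append, pv_join_cons, pv_join_nil,
        String.append_assoc]
    · simp [pvEmitStepB, hAB, hc, pv_fold_rows, pv_fold_th, pv_join_append, pv_join_cons,
        pv_join_nil, String.append_assoc]
      rw [show ("<table><tbody><tr>" : String) = "<table><tbody>" ++ "<tr>" from rfl,
        String.append_assoc]
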